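-- pv_equiv track=rewrite | github.com/hoclz/code_format | app.py | preprocess_code_python
-- ===== SOURCE A (Python) =====
-- def preprocess_code_python(raw_code: str) -> str:
--     """
--     For Python code only:
--     - Convert uppercase 'If', 'Else:' etc. to lowercase 'if', 'else:' to fix
--       partial syntax problems.
--     """
--     replacements = {
--         "Else:": "else:",
--         "Elif ": "elif ",
--         "If ": "if ",
--         "While ": "while ",
--         "For ": "for ",
--     }
--     lines = raw_code.splitlines(keepends=True)
--     new_lines = []
--     for line in lines:
--         for old, new in replacements.items():
--             if old in line:
--                 line = line.replace(old, new)
--         new_lines.append(line)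
--     return "".join(new_lines)
-- ===== SOURCE B (Python) =====
-- def preprocess_code_python(raw_code: str) -> str:
--     """Single left-to-right scan: at each position emit the replacement of the
--     first matching keyword (and jump over it) or copy one character."""
--     replacements = {
--         "Else:": "else:",
--         "Elif ": "elif ",
--         "If ": "if ",
--         "While ": "while ",
--         "For ": "for ",
--     }
--     out = []
--     i = 0
--     n = len(raw_code)
--     while i < n:
--         for old, new in replacements.items():
--             if raw_code.startswith(old, i):
--                 out.append(new)
--                 i += len(old)
--                 break
--         else:
--             out.append(raw_code[i])
--             i += 1
--     return "".join(out)
-- ===== Notes on version B (the rewrite author's own statement) =====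
-- stated objective: alternative
-- what changed: Replaced the splitlines loop with five sequential global str.replace passes per line by a single left-to-right scan that, at each position, emits the replacement of the first matching keyword or copies one character; correctness rests on the patterns never overlapping and the replacements never re-triggering a pattern.
import Mathlib
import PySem

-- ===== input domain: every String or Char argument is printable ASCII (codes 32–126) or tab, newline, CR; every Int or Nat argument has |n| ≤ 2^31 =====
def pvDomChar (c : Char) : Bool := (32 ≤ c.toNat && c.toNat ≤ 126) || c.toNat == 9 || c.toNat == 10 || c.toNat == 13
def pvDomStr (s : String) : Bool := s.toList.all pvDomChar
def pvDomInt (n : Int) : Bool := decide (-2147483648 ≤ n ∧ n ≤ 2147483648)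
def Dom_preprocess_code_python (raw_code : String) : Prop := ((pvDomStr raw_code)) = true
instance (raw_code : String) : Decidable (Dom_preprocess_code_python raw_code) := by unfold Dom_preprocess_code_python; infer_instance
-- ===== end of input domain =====

set_option maxRecDepth 8000


-- B rewrites A's splitlines + five per-line global str.replace passes as one left-to-right
-- scan replacing the first matching keyword at each position (alternative algorithm, not claimed faster).

-- ===== PORT A =====
-- hand port of str.splitlines(keepends=True): exact on the ASCII line boundaries \n, \v, \f, \r, \r\n, \x1c-\x1e
def pvIsBreak (c : Char) : Bool :=
  c.toNat == 10 || c.toNat == 11 || c.toNat == 12 || c.toNat == 13 ||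
  c.toNat == 28 || c.toNat == 29 || c.toNat == 30

-- first line (with its line end kept) and the remainder
def pvFirstLine : List Char → List Char × List Char
  | [] => ([], [])
  | c :: t =>
    if c == '\r' then
      match t with
      | d :: t' => if d == '\n' then ([c, d], t') else ([c], t)
      | [] => ([c], [])
    else if pvIsBreak c then ([c], t)
    else ((c :: (pvFirstLine t).1, (pvFirstLine t).2))

theorem pvFirstLine_snd_le : ∀ s : List Char, (pvFirstLine s).2.length ≤ s.length
  | [] => by simp [pvFirstLine]
  | c :: t => by
    simp only [pvFirstLine]
    split
    · cases t with
      | nil => simp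
      | cons d t' => by_cases hd : d = '\n' <;> simp [hd] <;> omega
    · split
      · simp
      · have := pvFirstLine_snd_le t
        simp only [List.length_cons]
        omega

theorem pvFirstLine_snd_lt (c : Char) (t : List Char) :
    (pvFirstLine (c :: t)).2.length < (c :: t).length := by
  simp only [pvFirstLine]
  split
  · cases t with
    | nil => simp
    | cons d t' => by_cases hd : d = '\n' <;> simp [hd] <;> omega
  · split
    · simp
    · have := pvFirstLine_snd_le t
      simp only [List.length_cons]
      omega

-- raw_code.splitlines(keepends=True)
def pvSplitKeep (s : List Char) : List (List Char) :=
  match s with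
  | [] => []
  | c :: t => (pvFirstLine (c :: t)).1 :: pvSplitKeep (pvFirstLine (c :: t)).2
termination_by s.length
decreasing_by exact pvFirstLine_snd_lt c t

-- the replacements dict, in insertion order
def pvReplacements : List (List Char × List Char) :=
  [("Else:".toList, "else:".toList), ("Elif ".toList, "elif ".toList),
   ("If ".toList, "if ".toList), ("While ".toList, "while ".toList),
   ("For ".toList, "for ".toList)]

def preprocess_code_python (raw_code : String) : String :=
  let lines := pvSplitKeep raw_code.toList
  let new_lines := lines.foldl (fun acc line =>
    acc ++ [pvReplacements.foldl
      (fun l r => if PySem.Chars.isIn r.1 l then PySem.Chars.replace l r.1 r.2 else l) line]) []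
  String.ofList (PySem.Chars.join [] new_lines)

-- ===== PORT B =====
-- the while-i scan of Source B: at each position replace the first matching keyword or copy one char
def pvScan (s : List Char) : List Char :=
  match s with
  | [] => []
  | c :: t =>
    if List.isPrefixOf "Else:".toList (c :: t) then "else:".toList ++ pvScan (t.drop 4)
    else if List.isPrefixOf "Elif ".toList (c :: t) then "elif ".toList ++ pvScan (t.drop 4)
    else if List.isPrefixOf "If ".toList (c :: t) then "if ".toList ++ pvScan (t.drop 2)
    else if List.isPrefixOf "While ".toList (c :: t) then "while ".toList ++ pvScan (t.drop 5)
    else if List.isPrefixOf "For ".toList (c :: t) then "for ".toList ++ pvScan (t.drop 3)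
    else c :: pvScan t
termination_by s.length
decreasing_by all_goals simp [List.length_drop] <;> omega

def preprocess_code_python_alt (raw_code : String) : String :=
  String.ofList (pvScan raw_code.toList)

-- ===== PRECONDITION & SPEC =====
def Spec_preprocess_code_python (raw_code : String) (out : String) : Prop := out = preprocess_code_python_alt raw_code
instance (raw_code : String) (out : String) : Decidable (Spec_preprocess_code_python raw_code out) := by unfold Spec_preprocess_code_python; infer_instance

-- ===== CLAIM (what is proved, stated in full; the proofs are below) =====
def Claim_equal_preprocess_code_python : Prop := ∀ (raw_code : String), Dom_preprocess_code_python raw_code → Spec_preprocess_code_python raw_code (preprocess_code_python raw_code)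

-- ===== LEMMAS AND PROOFS =====

-- clean structural version of str.replace (old nonempty)
def pvRepl (old new : List Char) : List Char → List Char
  | [] => []
  | c :: t =>
    if List.isPrefixOf old (c :: t) then new ++ pvRepl old new (t.drop (old.length - 1))
    else c :: pvRepl old new t
termination_by l => l.length
decreasing_by all_goals simp [List.length_drop] <;> omega

-- pattern/replacement literals
def pvP1 : List Char := "Else:".toList
def pvQ1 : List Char := "else:".toList
def pvP2 : List Char := "Elif ".toList
def pvQ2 : List Char := "elif ".toList
def pvP3 : List Char := "If ".toList
def pvQ3 : List Char := "if ".toList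
def pvP4 : List Char := "While ".toList
def pvQ4 : List Char := "while ".toList
def pvP5 : List Char := "For ".toList
def pvQ5 : List Char := "for ".toList

-- the chain of the five global replaces, in dict order
def pvC1 (l : List Char) : List Char := pvRepl pvP1 pvQ1 l
def pvC2 (l : List Char) : List Char := pvRepl pvP2 pvQ2 (pvC1 l)
def pvC3 (l : List Char) : List Char := pvRepl pvP3 pvQ3 (pvC2 l)
def pvC4 (l : List Char) : List Char := pvRepl pvP4 pvQ4 (pvC3 l)
def pvC5 (l : List Char) : List Char := pvRepl pvP5 pvQ5 (pvC4 l)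

-- PySem.Chars.replace agrees with pvRepl for nonempty old
theorem pvGo_eq (old new : List Char) (h : old ≠ []) :
    ∀ fuel (l acc : List Char), l.length ≤ fuel →
      PySem.Chars.replace.go old new fuel l acc = acc.reverse ++ pvRepl old new l := by
  intro fuel
  induction fuel with
  | zero =>
    intro l acc hl
    have hnil : l = [] := by cases l <;> simp_all
    subst hnil
    rw [PySem.Chars.replace.go, pvRepl]
  | succ n ih =>
    intro l acc hl
    cases l with
    | nil =>
      rw [PySem.Chars.replace.go]
      · simp [pvRepl]
      · omega
    | cons c t =>
      obtain ⟨o, os, rfl⟩ := List.exists_cons_of_ne_nil h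
      rw [PySem.Chars.replace.go, pvRepl]
      by_cases hpre : List.isPrefixOf (o :: os) (c :: t)
      · rw [if_pos hpre, if_pos hpre]
        have hlen : (o :: os).length ≤ (c :: t).length :=
          (List.isPrefixOf_iff_prefix.mp hpre).length_le
        rw [ih (List.drop (o :: os).length (c :: t)) (new.reverse ++ acc)
            (by simp only [List.length_drop]; simp at hl ⊢; omega)]
        simp [List.drop_succ_cons]
      · rw [if_neg hpre, if_neg hpre]
        rw [ih t (c :: acc) (by simp at hl ⊢; omega)]
        simp

theorem pvReplace_eq (l old new : List Char) (h : old ≠ []) :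
    PySem.Chars.replace l old new = pvRepl old new l := by
  rw [PySem.Chars.replace, if_neg (by simpa using h)]
  simpa using pvGo_eq old new h l.length l [] le_rfl

theorem pvRepl_of_not_infix (old new : List Char) :
    ∀ l, ¬ old <:+: l → pvRepl old new l = l
  | [], _ => by simp [pvRepl]
  | c :: t, h => by
    rw [pvRepl, if_neg (by
      intro hc
      exact h (List.isPrefixOf_iff_prefix.mp hc).isInfix)]
    rw [pvRepl_of_not_infix old new t (fun hi => h (hi.trans (List.suffix_cons c t).isInfix))]

-- no prefix of an append when the literal parts mismatch
theorem pvNoPre {w x : List Char} (u : List Char) (h1 : ¬ w <+: x) (h2 : ¬ x <+: w) :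
    ¬ w <+: (x ++ u) := by
  intro h
  rcases Nat.le_total w.length x.length with hle | hle
  · exact h1 (List.prefix_of_prefix_length_le h (List.prefix_append x u) hle)
  · exact h2 (List.prefix_of_prefix_length_le (List.prefix_append x u) h hle)

theorem pvNoPreB {w x : List Char} (u : List Char) (h1 : ¬ w <+: x) (h2 : ¬ x <+: w) :
    List.isPrefixOf w (x ++ u) = false := by
  rw [Bool.eq_false_iff]
  intro hc
  exact pvNoPre u h1 h2 (List.isPrefixOf_iff_prefix.mp hc)

-- replace passes over a literal block containing no match
theorem pvComm (p q x : List Char)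
    (hm : ∀ m, m < x.length → ¬ p <+: x.drop m ∧ ¬ x.drop m <+: p) :
    ∀ u, pvRepl p q (x ++ u) = x ++ pvRepl p q u := by
  induction x with
  | nil => intro u; simp
  | cons c t ih =>
    intro u
    have h0 := hm 0 (by simp)
    simp only [List.drop_zero] at h0
    rw [List.cons_append, pvRepl, if_neg (by
      intro hc
      exact pvNoPre u h0.1 h0.2 (by simpa using List.isPrefixOf_iff_prefix.mp hc))]
    rw [ih (fun m hm' => by simpa using hm (m + 1) (by simpa using hm')) u]
    simp

theorem pvReplCons (p q : List Char) (c : Char) (t : List Char) (h : ¬ p <+: c :: t) :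
    pvRepl p q (c :: t) = c :: pvRepl p q t := by
  rw [pvRepl, if_neg]
  intro hc; exact h (List.isPrefixOf_iff_prefix.mp hc)

theorem pvReplMatch (p q : List Char) (hp : p ≠ []) (t : List Char) :
    pvRepl p q (p ++ t) = q ++ pvRepl p q t := by
  obtain ⟨c, ps, rfl⟩ := List.exists_cons_of_ne_nil hp
  rw [List.cons_append, pvRepl,
    if_pos (List.isPrefixOf_iff_prefix.mpr (by simp [List.cons_prefix_cons]))]
  simp [List.drop_left']

-- a break-free pattern cannot cross a line boundary
theorem pvPfx (ch : Char) (b : List Char) :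
    ∀ (x p : List Char), (∀ c ∈ p, pvIsBreak c = false) → pvIsBreak ch = true →
      p <+: (x ++ [ch]) ++ b → p <+: x ++ [ch]
  | [], p, hbf, hch, h => by
    cases p with
    | nil => simp
    | cons o os =>
      simp only [List.nil_append, List.cons_append, List.cons_prefix_cons] at h
      exact absurd hch (by rw [← h.1]; simp [hbf o (by simp)])
  | c :: x, p, hbf, hch, h => by
    cases p with
    | nil => simp
    | cons o os =>
      simp only [List.cons_append, List.cons_prefix_cons] at h ⊢
      exact ⟨h.1, pvPfx ch b x os (fun e he => hbf e (by simp [he])) hch h.2⟩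

theorem pvReplSplit (p q : List Char) (hp : p ≠ []) (hbf : ∀ c ∈ p, pvIsBreak c = false)
    (ch : Char) (hch : pvIsBreak ch = true) :
    ∀ (x b : List Char), pvRepl p q ((x ++ [ch]) ++ b) = pvRepl p q (x ++ [ch]) ++ pvRepl p q b := by
  have hone : ∀ b : List Char, pvRepl p q (ch :: b) = ch :: pvRepl p q b := by
    intro b
    refine pvReplCons p q ch b ?_
    intro hpre
    obtain ⟨o, os, rfl⟩ := List.exists_cons_of_ne_nil hp
    rw [List.cons_prefix_cons] at hpre
    exact absurd hch (by rw [← hpre.1]; simp [hbf o (by simp)])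
  suffices H : ∀ (n : Nat) (x b : List Char), x.length ≤ n →
      pvRepl p q ((x ++ [ch]) ++ b) = pvRepl p q (x ++ [ch]) ++ pvRepl p q b by
    intro x b; exact H x.length x b le_rfl
  intro n
  induction n with
  | zero =>
    intro x b hx
    have hxe : x = [] := by cases x <;> simp_all
    subst hxe
    simp only [List.nil_append, List.singleton_append]
    rw [hone b, hone [], pvRepl]
    simp
  | succ n ih =>
    intro x b hx
    cases x with
    | nil =>
      simp only [List.nil_append, List.singleton_append]
      rw [hone b, hone [], pvRepl]
      simp
    | cons c t =>
      simp only [List.cons_append] at hx ⊢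
      have hx' : t.length ≤ n := by simp at hx; omega
      by_cases hg : p <+: c :: ((t ++ [ch]) ++ b)
      · have hpa : p <+: c :: (t ++ [ch]) := by
          have := pvPfx ch b (c :: t) p hbf hch (by simpa using hg)
          simpa using this
        have hplen : p.length ≤ t.length + 1 := by
          have hle := hpa.length_le
          simp at hle
          rcases Nat.lt_or_ge p.length (t.length + 2) with hlt | hge
          · omega
          · exfalso
            have hlen : p.length = (c :: (t ++ [ch])).length := by simp; omega
            have heq : p = c :: (t ++ [ch]) := List.IsPrefix.eq_of_length hpa hlen
            have : ch ∈ p := by rw [heq]; simp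
            simp [hbf ch this] at hch
        obtain ⟨o, os, rfl⟩ := List.exists_cons_of_ne_nil hp
        rw [pvRepl, if_pos (List.isPrefixOf_iff_prefix.mpr hg)]
        rw [pvRepl, if_pos (List.isPrefixOf_iff_prefix.mpr hpa)]
        have hk : (o :: os).length - 1 ≤ t.length := by simp at hplen ⊢; omega
        have hd1 : List.drop ((o :: os).length - 1) ((t ++ [ch]) ++ b)
            = List.drop ((o :: os).length - 1) (t ++ [ch]) ++ b :=
          List.drop_append_of_le_length (by have := hk; simp at this ⊢; omega)
        have hd2 : List.drop ((o :: os).length - 1) (t ++ [ch])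
            = List.drop ((o :: os).length - 1) t ++ [ch] :=
          List.drop_append_of_le_length hk
        rw [hd1, hd2,
          ih (List.drop ((o :: os).length - 1) t) b (by simp only [List.length_drop]; omega)]
        simp
      · have hga : ¬ p <+: c :: (t ++ [ch]) := by
          intro hpre
          exact hg (by
            have : p <+: (c :: (t ++ [ch])) ++ b := hpre.trans (List.prefix_append _ b)
            simpa using this)
        rw [pvReplCons p q c ((t ++ [ch]) ++ b) hg, pvReplCons p q c (t ++ [ch]) hga]
        rw [ih t b hx']
        simp

theorem pvReplEnd (p q : List Char) (hp : p ≠ []) (hbf : ∀ c ∈ p, pvIsBreak c = false)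
    (ch : Char) (hch : pvIsBreak ch = true) :
    ∀ x : List Char, ∃ a', pvRepl p q (x ++ [ch]) = a' ++ [ch] := by
  have hone : ∀ b : List Char, pvRepl p q (ch :: b) = ch :: pvRepl p q b := by
    intro b
    refine pvReplCons p q ch b ?_
    intro hpre
    obtain ⟨o, os, rfl⟩ := List.exists_cons_of_ne_nil hp
    rw [List.cons_prefix_cons] at hpre
    exact absurd hch (by rw [← hpre.1]; simp [hbf o (by simp)])
  suffices H : ∀ (n : Nat) (x : List Char), x.length ≤ n →
      ∃ a', pvRepl p q (x ++ [ch]) = a' ++ [ch] by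
    intro x; exact H x.length x le_rfl
  intro n
  induction n with
  | zero =>
    intro x hx
    have hxe : x = [] := by cases x <;> simp_all
    subst hxe
    refine ⟨[], ?_⟩
    simp only [List.nil_append]
    rw [hone [], pvRepl]
  | succ n ih =>
    intro x hx
    cases x with
    | nil =>
      refine ⟨[], ?_⟩
      simp only [List.nil_append]
      rw [hone [], pvRepl]
    | cons c t =>
      simp only [List.cons_append] at hx ⊢
      have hx' : t.length ≤ n := by simp at hx; omega
      by_cases hg : p <+: c :: (t ++ [ch])
      · have hplen : p.length ≤ t.length + 1 := by
          have hle := hg.length_le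
          simp at hle
          rcases Nat.lt_or_ge p.length (t.length + 2) with hlt | hge
          · omega
          · exfalso
            have hlen : p.length = (c :: (t ++ [ch])).length := by simp; omega
            have heq : p = c :: (t ++ [ch]) := List.IsPrefix.eq_of_length hg hlen
            have : ch ∈ p := by rw [heq]; simp
            simp [hbf ch this] at hch
        obtain ⟨o, os, rfl⟩ := List.exists_cons_of_ne_nil hp
        rw [pvRepl, if_pos (List.isPrefixOf_iff_prefix.mpr hg)]
        have hk : (o :: os).length - 1 ≤ t.length := by simp at hplen ⊢; omega
        rw [List.drop_append_of_le_length hk]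
        obtain ⟨a', ha'⟩ := ih (List.drop ((o :: os).length - 1) t)
          (by simp only [List.length_drop]; omega)
        exact ⟨q ++ a', by rw [ha']; simp⟩
      · rw [pvReplCons p q c (t ++ [ch]) hg]
        obtain ⟨a', ha'⟩ := ih t hx'
        exact ⟨c :: a', by rw [ha']; simp⟩

theorem pvBF (p : List Char) (l : List Char) (hl : p = l)
    (h : ∀ c ∈ l, pvIsBreak c = false) : ∀ c ∈ p, pvIsBreak c = false := hl ▸ h

theorem pvBF1 : ∀ c ∈ pvP1, pvIsBreak c = false := by
  refine pvBF _ ['E','l','s','e',':'] rfl ?_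
  intro c hc; simp at hc; rcases hc with rfl|rfl|rfl|rfl|rfl <;> rfl
theorem pvBF2 : ∀ c ∈ pvP2, pvIsBreak c = false := by
  refine pvBF _ ['E','l','i','f',' '] rfl ?_
  intro c hc; simp at hc; rcases hc with rfl|rfl|rfl|rfl|rfl <;> rfl
theorem pvBF3 : ∀ c ∈ pvP3, pvIsBreak c = false := by
  refine pvBF _ ['I','f',' '] rfl ?_
  intro c hc; simp at hc; rcases hc with rfl|rfl|rfl <;> rfl
theorem pvBF4 : ∀ c ∈ pvP4, pvIsBreak c = false := by
  refine pvBF _ ['W','h','i','l','e',' '] rfl ?_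
  intro c hc; simp at hc; rcases hc with rfl|rfl|rfl|rfl|rfl|rfl <;> rfl
theorem pvBF5 : ∀ c ∈ pvP5, pvIsBreak c = false := by
  refine pvBF _ ['F','o','r',' '] rfl ?_
  intro c hc; simp at hc; rcases hc with rfl|rfl|rfl|rfl <;> rfl

theorem pvC5_split (x : List Char) (ch : Char) (b : List Char) (h : pvIsBreak ch = true) :
    pvC5 ((x ++ [ch]) ++ b) = pvC5 (x ++ [ch]) ++ pvC5 b := by
  have step : ∀ (p q : List Char), p ≠ [] → (∀ c ∈ p, pvIsBreak c = false) →
      ∀ (g : List Char → List Char),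
      (g ((x ++ [ch]) ++ b) = g (x ++ [ch]) ++ g b) → (∃ y, g (x ++ [ch]) = y ++ [ch]) →
      (pvRepl p q (g ((x ++ [ch]) ++ b)) = pvRepl p q (g (x ++ [ch])) ++ pvRepl p q (g b))
        ∧ (∃ y, pvRepl p q (g (x ++ [ch])) = y ++ [ch]) := by
    rintro p q hp hbf g hs ⟨y, hy⟩
    constructor
    · rw [hs, hy, pvReplSplit p q hp hbf ch h y (g b), ← hy]
    · obtain ⟨y2, hy2⟩ := pvReplEnd p q hp hbf ch h y
      exact ⟨y2, by rw [hy, hy2]⟩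
  have A1 := step pvP1 pvQ1 (by decide) pvBF1 (fun l => l) rfl ⟨x, rfl⟩
  have A2 := step pvP2 pvQ2 (by decide) pvBF2 pvC1 A1.1 A1.2
  have A3 := step pvP3 pvQ3 (by decide) pvBF3 pvC2 A2.1 A2.2
  have A4 := step pvP4 pvQ4 (by decide) pvBF4 pvC3 A3.1 A3.2
  have A5 := step pvP5 pvQ5 (by decide) pvBF5 pvC4 A4.1 A4.2
  exact A5.1

theorem pvFirstLine_append : ∀ s : List Char, (pvFirstLine s).1 ++ (pvFirstLine s).2 = s
  | [] => by simp [pvFirstLine]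
  | c :: t => by
    simp only [pvFirstLine]
    split
    · cases t with
      | nil => simp
      | cons d t' => by_cases hd : d = '\n' <;> simp [hd]
    · split
      · simp
      · simpa using pvFirstLine_append t

theorem pvFirstLine_break : ∀ s : List Char, (pvFirstLine s).2 ≠ [] →
    ∃ x ch, (pvFirstLine s).1 = x ++ [ch] ∧ pvIsBreak ch = true
  | [] => by simp [pvFirstLine]
  | c :: t => by
    simp only [pvFirstLine]
    split
    · rename_i hc
      cases t with
      | nil => simp
      | cons d t' =>
        by_cases hd : d = '\n'
        · intro _
          exact ⟨[c], d, by simp [hd], by simp [hd, pvIsBreak]⟩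
        · intro _
          refine ⟨[], c, by simp [hd], ?_⟩
          have : c = '\x0d' := by simpa using hc
          simp [this, pvIsBreak]
    · split
      · rename_i hbr
        intro _
        exact ⟨[], c, by simp, hbr⟩
      · intro h2
        obtain ⟨x, ch, hx, hch⟩ := pvFirstLine_break t (by simpa using h2)
        exact ⟨c :: x, ch, by simp [hx], hch⟩

theorem pvFlattenSplit : ∀ (n : Nat) (s : List Char), s.length ≤ n →
    ((pvSplitKeep s).map pvC5).flatten = pvC5 s := by
  intro n
  induction n with
  | zero =>
    intro s hs
    have : s = [] := by cases s <;> simp_all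
    subst this
    rw [pvSplitKeep]
    simp [pvC5, pvC4, pvC3, pvC2, pvC1, pvRepl]
  | succ n ih =>
    intro s hs
    cases s with
    | nil =>
      rw [pvSplitKeep]
      simp [pvC5, pvC4, pvC3, pvC2, pvC1, pvRepl]
    | cons c t =>
      rw [pvSplitKeep]
      simp only [List.map_cons, List.flatten_cons]
      have hlt := pvFirstLine_snd_lt c t
      rw [ih (pvFirstLine (c :: t)).2 (by simp at hlt hs ⊢; omega)]
      have happ := pvFirstLine_append (c :: t)
      by_cases h2 : (pvFirstLine (c :: t)).2 = []
      · rw [h2] at happ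
        simp only [List.append_nil] at happ
        rw [happ, h2]
        simp [pvC5, pvC4, pvC3, pvC2, pvC1, pvRepl]
      · obtain ⟨x, ch, hx, hch⟩ := pvFirstLine_break (c :: t) h2
        calc pvC5 (pvFirstLine (c :: t)).1 ++ pvC5 (pvFirstLine (c :: t)).2
            = pvC5 ((x ++ [ch]) ++ (pvFirstLine (c :: t)).2) := by
              rw [pvC5_split x ch _ hch, ← hx]
          _ = pvC5 (c :: t) := by rw [← hx, happ]

-- the grand induction: the replace chain equals the single scan, together with the
-- prefix-transfer facts needed to push the chain through an unmatched head character
theorem pvRepl_nil (p q : List Char) : pvRepl p q [] = [] := by rw [pvRepl]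

theorem pvTfalse {w x u : List Char} {v : List Char} (hpre : w <+: x ++ u)
    (h1 : ¬ w <+: x) (h2 : ¬ x <+: w) : w <+: v := (pvNoPre u h1 h2 hpre).elim

theorem pvTstep {c : Char} {t g : List Char} (d : Char) (w' : List Char)
    (hpre : d :: w' <+: c :: g) (htrans : w' <+: g → w' <+: t) : d :: w' <+: c :: t := by
  rw [List.cons_prefix_cons] at hpre ⊢
  exact ⟨hpre.1, htrans hpre.2⟩

theorem pvGrandNil :
    (pvC5 [] = pvScan []) ∧
    (∀ w ∈ ["lif ".toList, "if ".toList, "f ".toList, " ".toList], w <+: pvC1 [] → w <+: ([] : List Char)) ∧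
    (∀ w ∈ ["f ".toList, " ".toList], w <+: pvC2 [] → w <+: ([] : List Char)) ∧
    (∀ w ∈ ["hile ".toList, "ile ".toList, "le ".toList, "e ".toList, " ".toList], w <+: pvC3 [] → w <+: ([] : List Char)) ∧
    (∀ w ∈ ["or ".toList, "r ".toList, " ".toList], w <+: pvC4 [] → w <+: ([] : List Char)) := by
  have h1 : pvC1 [] = [] := by simp [pvC1, pvRepl_nil]
  have h2 : pvC2 [] = [] := by simp [pvC2, h1, pvRepl_nil]
  have h3 : pvC3 [] = [] := by simp [pvC3, h2, pvRepl_nil]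
  have h4 : pvC4 [] = [] := by simp [pvC4, h3, pvRepl_nil]
  have h5 : pvC5 [] = [] := by simp [pvC5, h4, pvRepl_nil]
  refine ⟨by rw [h5, pvScan], ?_, ?_, ?_, ?_⟩ <;>
  · intro w hw hpre
    simp only [List.mem_cons, List.not_mem_nil, or_false] at hw
    first
    | (rcases hw with rfl|rfl|rfl|rfl|rfl <;> simp_all)
    | (rcases hw with rfl|rfl|rfl|rfl <;> simp_all)
    | (rcases hw with rfl|rfl|rfl <;> simp_all)
    | (rcases hw with rfl|rfl <;> simp_all)

theorem pvGrand : ∀ (n : Nat) (s : List Char), s.length ≤ n →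
    (pvC5 s = pvScan s) ∧
    (∀ w ∈ ["lif ".toList, "if ".toList, "f ".toList, " ".toList], w <+: pvC1 s → w <+: s) ∧
    (∀ w ∈ ["f ".toList, " ".toList], w <+: pvC2 s → w <+: s) ∧
    (∀ w ∈ ["hile ".toList, "ile ".toList, "le ".toList, "e ".toList, " ".toList], w <+: pvC3 s → w <+: s) ∧
    (∀ w ∈ ["or ".toList, "r ".toList, " ".toList], w <+: pvC4 s → w <+: s) := by
  intro n
  induction n with
  | zero =>
    intro s hs
    have hse : s = [] := by cases s <;> simp_all
    subst hse
    exact pvGrandNil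
  | succ n ih =>
    intro s hs
    cases s with
    | nil => exact pvGrandNil
    | cons c t =>
      have ht : t.length ≤ n := by simp at hs; omega
      obtain ⟨ihM, ihT2, ihT3, ihT4, ihT5⟩ := ih t ht
      by_cases h1 : ("Else:".toList : List Char) <+: c :: t
      case pos =>
        obtain ⟨t', ht'⟩ := h1
        have hlen : t'.length ≤ t.length := by
          have := congrArg List.length ht'
          simp at this
          omega
        obtain ⟨ihM', ihT2', ihT3', ihT4', ihT5'⟩ := ih t' (by omega)
        have e1 : pvC1 ("Else:".toList ++ t') = "else:".toList ++ pvC1 t' := by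
          simp only [pvC1]
          exact pvReplMatch pvP1 pvQ1 (by decide) t'
        have e2 : pvC2 ("Else:".toList ++ t') = "else:".toList ++ pvC2 t' := by
          simp only [pvC2]
          rw [e1]
          exact pvComm pvP2 pvQ2 "else:".toList (by decide) (pvC1 t')
        have e3 : pvC3 ("Else:".toList ++ t') = "else:".toList ++ pvC3 t' := by
          simp only [pvC3]
          rw [e2]
          exact pvComm pvP3 pvQ3 "else:".toList (by decide) (pvC2 t')
        have e4 : pvC4 ("Else:".toList ++ t') = "else:".toList ++ pvC4 t' := by
          simp only [pvC4]
          rw [e3]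
          exact pvComm pvP4 pvQ4 "else:".toList (by decide) (pvC3 t')
        have e5 : pvC5 ("Else:".toList ++ t') = "else:".toList ++ pvC5 t' := by
          simp only [pvC5]
          rw [e4]
          exact pvComm pvP5 pvQ5 "else:".toList (by decide) (pvC4 t')
        have hsc : pvScan ("Else:".toList ++ t') = "else:".toList ++ pvScan t' := by
          show pvScan ('E' :: 'l' :: 's' :: 'e' :: ':' :: t') = _
          rw [pvScan]
          rw [show List.isPrefixOf "Else:".toList ('E' :: 'l' :: 's' :: 'e' :: ':' :: t') = true from List.isPrefixOf_iff_prefix.mpr ⟨t', rfl⟩]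
          simp
        refine ⟨?_, ?_, ?_, ?_, ?_⟩
        · rw [← ht', e5, hsc, ihM']
        · intro w hw hpre
          rw [← ht'] at hpre
          rw [e1] at hpre
          simp only [List.mem_cons, List.not_mem_nil, or_false] at hw
          rcases hw with rfl|rfl|rfl|rfl
          · exact pvTfalse hpre (by decide) (by decide)
          · exact pvTfalse hpre (by decide) (by decide)
          · exact pvTfalse hpre (by decide) (by decide)
          · exact pvTfalse hpre (by decide) (by decide)
        · intro w hw hpre
          rw [← ht'] at hpre
          rw [e2] at hpre
          simp only [List.mem_cons, List.not_mem_nil, or_false] at hw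
          rcases hw with rfl|rfl
          · exact pvTfalse hpre (by decide) (by decide)
          · exact pvTfalse hpre (by decide) (by decide)
        · intro w hw hpre
          rw [← ht'] at hpre
          rw [e3] at hpre
          simp only [List.mem_cons, List.not_mem_nil, or_false] at hw
          rcases hw with rfl|rfl|rfl|rfl|rfl
          · exact pvTfalse hpre (by decide) (by decide)
          · exact pvTfalse hpre (by decide) (by decide)
          · exact pvTfalse hpre (by decide) (by decide)
          · exact pvTfalse hpre (by decide) (by decide)
          · exact pvTfalse hpre (by decide) (by decide)
        · intro w hw hpre
          rw [← ht'] at hpre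
          rw [e4] at hpre
          simp only [List.mem_cons, List.not_mem_nil, or_false] at hw
          rcases hw with rfl|rfl|rfl
          · exact pvTfalse hpre (by decide) (by decide)
          · exact pvTfalse hpre (by decide) (by decide)
          · exact pvTfalse hpre (by decide) (by decide)
      by_cases h2 : ("Elif ".toList : List Char) <+: c :: t
      case pos =>
        obtain ⟨t', ht'⟩ := h2
        have hlen : t'.length ≤ t.length := by
          have := congrArg List.length ht'
          simp at this
          omega
        obtain ⟨ihM', ihT2', ihT3', ihT4', ihT5'⟩ := ih t' (by omega)
        have e1 : pvC1 ("Elif ".toList ++ t') = "Elif ".toList ++ pvC1 t' := by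
          simp only [pvC1]
          exact pvComm pvP1 pvQ1 "Elif ".toList (by decide) t'
        have e2 : pvC2 ("Elif ".toList ++ t') = "elif ".toList ++ pvC2 t' := by
          simp only [pvC2]
          rw [e1]
          exact pvReplMatch pvP2 pvQ2 (by decide) (pvC1 t')
        have e3 : pvC3 ("Elif ".toList ++ t') = "elif ".toList ++ pvC3 t' := by
          simp only [pvC3]
          rw [e2]
          exact pvComm pvP3 pvQ3 "elif ".toList (by decide) (pvC2 t')
        have e4 : pvC4 ("Elif ".toList ++ t') = "elif ".toList ++ pvC4 t' := by
          simp only [pvC4]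
          rw [e3]
          exact pvComm pvP4 pvQ4 "elif ".toList (by decide) (pvC3 t')
        have e5 : pvC5 ("Elif ".toList ++ t') = "elif ".toList ++ pvC5 t' := by
          simp only [pvC5]
          rw [e4]
          exact pvComm pvP5 pvQ5 "elif ".toList (by decide) (pvC4 t')
        have hsc : pvScan ("Elif ".toList ++ t') = "elif ".toList ++ pvScan t' := by
          show pvScan ('E' :: 'l' :: 'i' :: 'f' :: ' ' :: t') = _
          rw [pvScan]
          rw [show List.isPrefixOf "Else:".toList ('E' :: 'l' :: 'i' :: 'f' :: ' ' :: t') = false from pvNoPreB (x := ['E','l','i','f',' ']) t' (by decide) (by decide),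
      show List.isPrefixOf "Elif ".toList ('E' :: 'l' :: 'i' :: 'f' :: ' ' :: t') = true from List.isPrefixOf_iff_prefix.mpr ⟨t', rfl⟩]
          simp
        refine ⟨?_, ?_, ?_, ?_, ?_⟩
        · rw [← ht', e5, hsc, ihM']
        · intro w hw hpre
          rw [← ht'] at hpre
          rw [e1] at hpre
          simp only [List.mem_cons, List.not_mem_nil, or_false] at hw
          rcases hw with rfl|rfl|rfl|rfl
          · exact pvTfalse hpre (by decide) (by decide)
          · exact pvTfalse hpre (by decide) (by decide)
          · exact pvTfalse hpre (by decide) (by decide)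
          · exact pvTfalse hpre (by decide) (by decide)
        · intro w hw hpre
          rw [← ht'] at hpre
          rw [e2] at hpre
          simp only [List.mem_cons, List.not_mem_nil, or_false] at hw
          rcases hw with rfl|rfl
          · exact pvTfalse hpre (by decide) (by decide)
          · exact pvTfalse hpre (by decide) (by decide)
        · intro w hw hpre
          rw [← ht'] at hpre
          rw [e3] at hpre
          simp only [List.mem_cons, List.not_mem_nil, or_false] at hw
          rcases hw with rfl|rfl|rfl|rfl|rfl
          · exact pvTfalse hpre (by decide) (by decide)
          · exact pvTfalse hpre (by decide) (by decide)
          · exact pvTfalse hpre (by decide) (by decide)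
          · exact pvTfalse hpre (by decide) (by decide)
          · exact pvTfalse hpre (by decide) (by decide)
        · intro w hw hpre
          rw [← ht'] at hpre
          rw [e4] at hpre
          simp only [List.mem_cons, List.not_mem_nil, or_false] at hw
          rcases hw with rfl|rfl|rfl
          · exact pvTfalse hpre (by decide) (by decide)
          · exact pvTfalse hpre (by decide) (by decide)
          · exact pvTfalse hpre (by decide) (by decide)
      by_cases h3 : ("If ".toList : List Char) <+: c :: t
      case pos =>
        obtain ⟨t', ht'⟩ := h3
        have hlen : t'.length ≤ t.length := by
          have := congrArg List.length ht'
          simp at this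
          omega
        obtain ⟨ihM', ihT2', ihT3', ihT4', ihT5'⟩ := ih t' (by omega)
        have e1 : pvC1 ("If ".toList ++ t') = "If ".toList ++ pvC1 t' := by
          simp only [pvC1]
          exact pvComm pvP1 pvQ1 "If ".toList (by decide) t'
        have e2 : pvC2 ("If ".toList ++ t') = "If ".toList ++ pvC2 t' := by
          simp only [pvC2]
          rw [e1]
          exact pvComm pvP2 pvQ2 "If ".toList (by decide) (pvC1 t')
        have e3 : pvC3 ("If ".toList ++ t') = "if ".toList ++ pvC3 t' := by
          simp only [pvC3]
          rw [e2]
          exact pvReplMatch pvP3 pvQ3 (by decide) (pvC2 t')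
        have e4 : pvC4 ("If ".toList ++ t') = "if ".toList ++ pvC4 t' := by
          simp only [pvC4]
          rw [e3]
          exact pvComm pvP4 pvQ4 "if ".toList (by decide) (pvC3 t')
        have e5 : pvC5 ("If ".toList ++ t') = "if ".toList ++ pvC5 t' := by
          simp only [pvC5]
          rw [e4]
          exact pvComm pvP5 pvQ5 "if ".toList (by decide) (pvC4 t')
        have hsc : pvScan ("If ".toList ++ t') = "if ".toList ++ pvScan t' := by
          show pvScan ('I' :: 'f' :: ' ' :: t') = _
          rw [pvScan]
          rw [show List.isPrefixOf "Else:".toList ('I' :: 'f' :: ' ' :: t') = false from pvNoPreB (x := ['I','f',' ']) t' (by decide) (by decide),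
      show List.isPrefixOf "Elif ".toList ('I' :: 'f' :: ' ' :: t') = false from pvNoPreB (x := ['I','f',' ']) t' (by decide) (by decide),
      show List.isPrefixOf "If ".toList ('I' :: 'f' :: ' ' :: t') = true from List.isPrefixOf_iff_prefix.mpr ⟨t', rfl⟩]
          simp
        refine ⟨?_, ?_, ?_, ?_, ?_⟩
        · rw [← ht', e5, hsc, ihM']
        · intro w hw hpre
          rw [← ht'] at hpre
          rw [e1] at hpre
          simp only [List.mem_cons, List.not_mem_nil, or_false] at hw
          rcases hw with rfl|rfl|rfl|rfl
          · exact pvTfalse hpre (by decide) (by decide)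
          · exact pvTfalse hpre (by decide) (by decide)
          · exact pvTfalse hpre (by decide) (by decide)
          · exact pvTfalse hpre (by decide) (by decide)
        · intro w hw hpre
          rw [← ht'] at hpre
          rw [e2] at hpre
          simp only [List.mem_cons, List.not_mem_nil, or_false] at hw
          rcases hw with rfl|rfl
          · exact pvTfalse hpre (by decide) (by decide)
          · exact pvTfalse hpre (by decide) (by decide)
        · intro w hw hpre
          rw [← ht'] at hpre
          rw [e3] at hpre
          simp only [List.mem_cons, List.not_mem_nil, or_false] at hw
          rcases hw with rfl|rfl|rfl|rfl|rfl
          · exact pvTfalse hpre (by decide) (by decide)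
          · exact pvTfalse hpre (by decide) (by decide)
          · exact pvTfalse hpre (by decide) (by decide)
          · exact pvTfalse hpre (by decide) (by decide)
          · exact pvTfalse hpre (by decide) (by decide)
        · intro w hw hpre
          rw [← ht'] at hpre
          rw [e4] at hpre
          simp only [List.mem_cons, List.not_mem_nil, or_false] at hw
          rcases hw with rfl|rfl|rfl
          · exact pvTfalse hpre (by decide) (by decide)
          · exact pvTfalse hpre (by decide) (by decide)
          · exact pvTfalse hpre (by decide) (by decide)
      by_cases h4 : ("While ".toList : List Char) <+: c :: t
      case pos =>
        obtain ⟨t', ht'⟩ := h4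
        have hlen : t'.length ≤ t.length := by
          have := congrArg List.length ht'
          simp at this
          omega
        obtain ⟨ihM', ihT2', ihT3', ihT4', ihT5'⟩ := ih t' (by omega)
        have e1 : pvC1 ("While ".toList ++ t') = "While ".toList ++ pvC1 t' := by
          simp only [pvC1]
          exact pvComm pvP1 pvQ1 "While ".toList (by decide) t'
        have e2 : pvC2 ("While ".toList ++ t') = "While ".toList ++ pvC2 t' := by
          simp only [pvC2]
          rw [e1]
          exact pvComm pvP2 pvQ2 "While ".toList (by decide) (pvC1 t')
        have e3 : pvC3 ("While ".toList ++ t') = "While ".toList ++ pvC3 t' := by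
          simp only [pvC3]
          rw [e2]
          exact pvComm pvP3 pvQ3 "While ".toList (by decide) (pvC2 t')
        have e4 : pvC4 ("While ".toList ++ t') = "while ".toList ++ pvC4 t' := by
          simp only [pvC4]
          rw [e3]
          exact pvReplMatch pvP4 pvQ4 (by decide) (pvC3 t')
        have e5 : pvC5 ("While ".toList ++ t') = "while ".toList ++ pvC5 t' := by
          simp only [pvC5]
          rw [e4]
          exact pvComm pvP5 pvQ5 "while ".toList (by decide) (pvC4 t')
        have hsc : pvScan ("While ".toList ++ t') = "while ".toList ++ pvScan t' := by
          show pvScan ('W' :: 'h' :: 'i' :: 'l' :: 'e' :: ' ' :: t') = _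
          rw [pvScan]
          rw [show List.isPrefixOf "Else:".toList ('W' :: 'h' :: 'i' :: 'l' :: 'e' :: ' ' :: t') = false from pvNoPreB (x := ['W','h','i','l','e',' ']) t' (by decide) (by decide),
      show List.isPrefixOf "Elif ".toList ('W' :: 'h' :: 'i' :: 'l' :: 'e' :: ' ' :: t') = false from pvNoPreB (x := ['W','h','i','l','e',' ']) t' (by decide) (by decide),
      show List.isPrefixOf "If ".toList ('W' :: 'h' :: 'i' :: 'l' :: 'e' :: ' ' :: t') = false from pvNoPreB (x := ['W','h','i','l','e',' ']) t' (by decide) (by decide),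
      show List.isPrefixOf "While ".toList ('W' :: 'h' :: 'i' :: 'l' :: 'e' :: ' ' :: t') = true from List.isPrefixOf_iff_prefix.mpr ⟨t', rfl⟩]
          simp
        refine ⟨?_, ?_, ?_, ?_, ?_⟩
        · rw [← ht', e5, hsc, ihM']
        · intro w hw hpre
          rw [← ht'] at hpre
          rw [e1] at hpre
          simp only [List.mem_cons, List.not_mem_nil, or_false] at hw
          rcases hw with rfl|rfl|rfl|rfl
          · exact pvTfalse hpre (by decide) (by decide)
          · exact pvTfalse hpre (by decide) (by decide)
          · exact pvTfalse hpre (by decide) (by decide)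
          · exact pvTfalse hpre (by decide) (by decide)
        · intro w hw hpre
          rw [← ht'] at hpre
          rw [e2] at hpre
          simp only [List.mem_cons, List.not_mem_nil, or_false] at hw
          rcases hw with rfl|rfl
          · exact pvTfalse hpre (by decide) (by decide)
          · exact pvTfalse hpre (by decide) (by decide)
        · intro w hw hpre
          rw [← ht'] at hpre
          rw [e3] at hpre
          simp only [List.mem_cons, List.not_mem_nil, or_false] at hw
          rcases hw with rfl|rfl|rfl|rfl|rfl
          · exact pvTfalse hpre (by decide) (by decide)
          · exact pvTfalse hpre (by decide) (by decide)
          · exact pvTfalse hpre (by decide) (by decide)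
          · exact pvTfalse hpre (by decide) (by decide)
          · exact pvTfalse hpre (by decide) (by decide)
        · intro w hw hpre
          rw [← ht'] at hpre
          rw [e4] at hpre
          simp only [List.mem_cons, List.not_mem_nil, or_false] at hw
          rcases hw with rfl|rfl|rfl
          · exact pvTfalse hpre (by decide) (by decide)
          · exact pvTfalse hpre (by decide) (by decide)
          · exact pvTfalse hpre (by decide) (by decide)
      by_cases h5 : ("For ".toList : List Char) <+: c :: t
      case pos =>
        obtain ⟨t', ht'⟩ := h5
        have hlen : t'.length ≤ t.length := by
          have := congrArg List.length ht'
          simp at this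
          omega
        obtain ⟨ihM', ihT2', ihT3', ihT4', ihT5'⟩ := ih t' (by omega)
        have e1 : pvC1 ("For ".toList ++ t') = "For ".toList ++ pvC1 t' := by
          simp only [pvC1]
          exact pvComm pvP1 pvQ1 "For ".toList (by decide) t'
        have e2 : pvC2 ("For ".toList ++ t') = "For ".toList ++ pvC2 t' := by
          simp only [pvC2]
          rw [e1]
          exact pvComm pvP2 pvQ2 "For ".toList (by decide) (pvC1 t')
        have e3 : pvC3 ("For ".toList ++ t') = "For ".toList ++ pvC3 t' := by
          simp only [pvC3]
          rw [e2]
          exact pvComm pvP3 pvQ3 "For ".toList (by decide) (pvC2 t')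
        have e4 : pvC4 ("For ".toList ++ t') = "For ".toList ++ pvC4 t' := by
          simp only [pvC4]
          rw [e3]
          exact pvComm pvP4 pvQ4 "For ".toList (by decide) (pvC3 t')
        have e5 : pvC5 ("For ".toList ++ t') = "for ".toList ++ pvC5 t' := by
          simp only [pvC5]
          rw [e4]
          exact pvReplMatch pvP5 pvQ5 (by decide) (pvC4 t')
        have hsc : pvScan ("For ".toList ++ t') = "for ".toList ++ pvScan t' := by
          show pvScan ('F' :: 'o' :: 'r' :: ' ' :: t') = _
          rw [pvScan]
          rw [show List.isPrefixOf "Else:".toList ('F' :: 'o' :: 'r' :: ' ' :: t') = false from pvNoPreB (x := ['F','o','r',' ']) t' (by decide) (by decide),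
      show List.isPrefixOf "Elif ".toList ('F' :: 'o' :: 'r' :: ' ' :: t') = false from pvNoPreB (x := ['F','o','r',' ']) t' (by decide) (by decide),
      show List.isPrefixOf "If ".toList ('F' :: 'o' :: 'r' :: ' ' :: t') = false from pvNoPreB (x := ['F','o','r',' ']) t' (by decide) (by decide),
      show List.isPrefixOf "While ".toList ('F' :: 'o' :: 'r' :: ' ' :: t') = false from pvNoPreB (x := ['F','o','r',' ']) t' (by decide) (by decide),
      show List.isPrefixOf "For ".toList ('F' :: 'o' :: 'r' :: ' ' :: t') = true from List.isPrefixOf_iff_prefix.mpr ⟨t', rfl⟩]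
          simp
        refine ⟨?_, ?_, ?_, ?_, ?_⟩
        · rw [← ht', e5, hsc, ihM']
        · intro w hw hpre
          rw [← ht'] at hpre
          rw [e1] at hpre
          simp only [List.mem_cons, List.not_mem_nil, or_false] at hw
          rcases hw with rfl|rfl|rfl|rfl
          · exact pvTfalse hpre (by decide) (by decide)
          · exact pvTfalse hpre (by decide) (by decide)
          · exact pvTfalse hpre (by decide) (by decide)
          · exact pvTfalse hpre (by decide) (by decide)
        · intro w hw hpre
          rw [← ht'] at hpre
          rw [e2] at hpre
          simp only [List.mem_cons, List.not_mem_nil, or_false] at hw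
          rcases hw with rfl|rfl
          · exact pvTfalse hpre (by decide) (by decide)
          · exact pvTfalse hpre (by decide) (by decide)
        · intro w hw hpre
          rw [← ht'] at hpre
          rw [e3] at hpre
          simp only [List.mem_cons, List.not_mem_nil, or_false] at hw
          rcases hw with rfl|rfl|rfl|rfl|rfl
          · exact pvTfalse hpre (by decide) (by decide)
          · exact pvTfalse hpre (by decide) (by decide)
          · exact pvTfalse hpre (by decide) (by decide)
          · exact pvTfalse hpre (by decide) (by decide)
          · exact pvTfalse hpre (by decide) (by decide)
        · intro w hw hpre
          rw [← ht'] at hpre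
          rw [e4] at hpre
          simp only [List.mem_cons, List.not_mem_nil, or_false] at hw
          rcases hw with rfl|rfl|rfl
          · exact pvTfalse hpre (by decide) (by decide)
          · exact pvTfalse hpre (by decide) (by decide)
          · exact pvTfalse hpre (by decide) (by decide)
      -- no keyword matches at the head
      have n1 : pvC1 (c :: t) = c :: pvC1 t := by
        simp only [pvC1]
        exact pvReplCons pvP1 pvQ1 c t h1
      have hnp2 : ¬ (pvP2 : List Char) <+: c :: pvC1 t := by
        intro hp
        rw [show (pvP2 : List Char) = 'E' :: "lif ".toList from rfl, List.cons_prefix_cons] at hp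
        refine h2 ?_
        rw [show ("Elif ".toList : List Char) = 'E' :: "lif ".toList from rfl, List.cons_prefix_cons]
        exact ⟨hp.1, ihT2 _ (by simp) hp.2⟩
      have n2 : pvC2 (c :: t) = c :: pvC2 t := by
        simp only [pvC2]
        rw [n1]
        exact pvReplCons pvP2 pvQ2 c (pvC1 t) hnp2
      have hnp3 : ¬ (pvP3 : List Char) <+: c :: pvC2 t := by
        intro hp
        rw [show (pvP3 : List Char) = 'I' :: "f ".toList from rfl, List.cons_prefix_cons] at hp
        refine h3 ?_
        rw [show ("If ".toList : List Char) = 'I' :: "f ".toList from rfl, List.cons_prefix_cons]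
        exact ⟨hp.1, ihT3 _ (by simp) hp.2⟩
      have n3 : pvC3 (c :: t) = c :: pvC3 t := by
        simp only [pvC3]
        rw [n2]
        exact pvReplCons pvP3 pvQ3 c (pvC2 t) hnp3
      have hnp4 : ¬ (pvP4 : List Char) <+: c :: pvC3 t := by
        intro hp
        rw [show (pvP4 : List Char) = 'W' :: "hile ".toList from rfl, List.cons_prefix_cons] at hp
        refine h4 ?_
        rw [show ("While ".toList : List Char) = 'W' :: "hile ".toList from rfl, List.cons_prefix_cons]
        exact ⟨hp.1, ihT4 _ (by simp) hp.2⟩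
      have n4 : pvC4 (c :: t) = c :: pvC4 t := by
        simp only [pvC4]
        rw [n3]
        exact pvReplCons pvP4 pvQ4 c (pvC3 t) hnp4
      have hnp5 : ¬ (pvP5 : List Char) <+: c :: pvC4 t := by
        intro hp
        rw [show (pvP5 : List Char) = 'F' :: "or ".toList from rfl, List.cons_prefix_cons] at hp
        refine h5 ?_
        rw [show ("For ".toList : List Char) = 'F' :: "or ".toList from rfl, List.cons_prefix_cons]
        exact ⟨hp.1, ihT5 _ (by simp) hp.2⟩
      have n5 : pvC5 (c :: t) = c :: pvC5 t := by
        simp only [pvC5]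
        rw [n4]
        exact pvReplCons pvP5 pvQ5 c (pvC4 t) hnp5
      have hscn : pvScan (c :: t) = c :: pvScan t := by
        rw [pvScan]
        simp only [List.isPrefixOf_iff_prefix]
        rw [if_neg h1, if_neg h2, if_neg h3, if_neg h4, if_neg h5]
      refine ⟨?_, ?_, ?_, ?_, ?_⟩
      · rw [n5, hscn, ihM]
      · intro w hw hpre
        rw [n1] at hpre
        simp only [List.mem_cons, List.not_mem_nil, or_false] at hw
        rcases hw with rfl|rfl|rfl|rfl
        · exact pvTstep 'l' "if ".toList hpre (fun h => ihT2 _ (by simp) h)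
        · exact pvTstep 'i' "f ".toList hpre (fun h => ihT2 _ (by simp) h)
        · exact pvTstep 'f' " ".toList hpre (fun h => ihT2 _ (by simp) h)
        · exact pvTstep ' ' [] hpre (fun _ => List.nil_prefix)
      · intro w hw hpre
        rw [n2] at hpre
        simp only [List.mem_cons, List.not_mem_nil, or_false] at hw
        rcases hw with rfl|rfl
        · exact pvTstep 'f' " ".toList hpre (fun h => ihT3 _ (by simp) h)
        · exact pvTstep ' ' [] hpre (fun _ => List.nil_prefix)
      · intro w hw hpre
        rw [n3] at hpre
        simp only [List.mem_cons, List.not_mem_nil, or_false] at hw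
        rcases hw with rfl|rfl|rfl|rfl|rfl
        · exact pvTstep 'h' "ile ".toList hpre (fun h => ihT4 _ (by simp) h)
        · exact pvTstep 'i' "le ".toList hpre (fun h => ihT4 _ (by simp) h)
        · exact pvTstep 'l' "e ".toList hpre (fun h => ihT4 _ (by simp) h)
        · exact pvTstep 'e' " ".toList hpre (fun h => ihT4 _ (by simp) h)
        · exact pvTstep ' ' [] hpre (fun _ => List.nil_prefix)
      · intro w hw hpre
        rw [n4] at hpre
        simp only [List.mem_cons, List.not_mem_nil, or_false] at hw
        rcases hw with rfl|rfl|rfl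
        · exact pvTstep 'o' "r ".toList hpre (fun h => ihT5 _ (by simp) h)
        · exact pvTstep 'r' " ".toList hpre (fun h => ihT5 _ (by simp) h)
        · exact pvTstep ' ' [] hpre (fun _ => List.nil_prefix)

theorem pvLine_eq (line : List Char) :
    pvReplacements.foldl
      (fun l r => if PySem.Chars.isIn r.1 l then PySem.Chars.replace l r.1 r.2 else l) line
    = pvC5 line := by
  have step : ∀ (p q l : List Char), p ≠ [] →
      (if PySem.Chars.isIn p l then PySem.Chars.replace l p q else l) = pvRepl p q l := by
    intro p q l hp
    by_cases hin : PySem.Chars.isIn p l = true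
    · rw [if_pos hin, pvReplace_eq l p q hp]
    · rw [if_neg (by simpa using hin)]
      refine (pvRepl_of_not_infix p q l ?_).symm
      intro hi
      exact hin ((PySem.Chars.isIn_iff_infix p l).mpr hi)
  simp only [pvReplacements, List.foldl_cons, List.foldl_nil]
  rw [step _ _ _ (by decide), step _ _ _ (by decide), step _ _ _ (by decide),
      step _ _ _ (by decide), step _ _ _ (by decide)]
  rfl

theorem pvJoinNil : ∀ ps : List (List Char), PySem.Chars.join [] ps = ps.flatten
  | [] => by simp [pysem]
  | [a] => by simp [pysem]
  | a :: b :: t => by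
    rw [PySem.Chars.join_cons_cons, pvJoinNil (b :: t)]
    simp

-- ===== VERDICT (by name: the statement is the Claim_ definition above) =====
theorem preprocess_code_python_spec : Claim_equal_preprocess_code_python := by
  intro raw_code _
  unfold Spec_preprocess_code_python preprocess_code_python preprocess_code_python_alt
  simp only [PySem.List.foldl_append_singleton_eq_map, List.nil_append]
  rw [pvJoinNil]
  have h1 : (pvSplitKeep raw_code.toList).map
      (fun line => pvReplacements.foldl
        (fun l r => if PySem.Chars.isIn r.1 l then PySem.Chars.replace l r.1 r.2 else l) line)
      = (pvSplitKeep raw_code.toList).map pvC5 := by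
    apply List.map_congr_left; intro l _; exact pvLine_eq l
  rw [h1, pvFlattenSplit raw_code.toList.length raw_code.toList le_rfl,
      (pvGrand raw_code.toList.length raw_code.toList le_rfl).1]
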